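-- pv_equiv track=rewrite | github.com/ricwheatley/Pete-Eebot | pete_e/application/api_services.py | _next_deload_week
-- ===== SOURCE A (Python) =====
-- def _next_deload_week(current_week: int | None, total_weeks: int) -> int | None:
--     if current_week is None or total_weeks <= 0:
--         return None
--     week = current_week
--     while week <= total_weeks:
--         if week % 4 == 0:
--             return week
--         week += 1
--     return None
--     """Perform next deload week."""
-- ===== SOURCE B (Python) =====
-- def _next_deload_week(current_week, total_weeks):
--     if current_week is None or total_weeks <= 0:
--         return None
--     candidate = ((current_week + 3) // 4) * 4
--     return candidate if candidate <= total_weeks else None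
-- ===== Notes on version B (the rewrite author's own statement) =====
-- stated objective: simpler
-- what changed: Replaced the increment-until-multiple-of-4 loop with a closed-form ceiling-to-multiple-of-4 computation ((current_week+3)//4)*4 followed by a single bound check.
import Mathlib
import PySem

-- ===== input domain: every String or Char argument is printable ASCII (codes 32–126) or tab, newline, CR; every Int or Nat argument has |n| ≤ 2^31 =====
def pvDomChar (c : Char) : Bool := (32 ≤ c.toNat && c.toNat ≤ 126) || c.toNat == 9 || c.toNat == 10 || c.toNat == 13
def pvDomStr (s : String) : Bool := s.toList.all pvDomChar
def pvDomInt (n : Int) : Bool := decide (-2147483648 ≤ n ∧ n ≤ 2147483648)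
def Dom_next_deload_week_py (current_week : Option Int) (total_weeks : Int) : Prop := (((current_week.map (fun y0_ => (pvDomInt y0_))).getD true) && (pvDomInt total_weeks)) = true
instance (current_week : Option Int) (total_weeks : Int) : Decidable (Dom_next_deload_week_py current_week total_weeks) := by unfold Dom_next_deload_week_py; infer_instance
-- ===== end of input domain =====

-- B replaces A's increment-until-multiple-of-4 loop by a closed-form ceiling to a multiple of 4 (simpler).
-- ===== PORT A =====
-- the `while week <= total_weeks` loop of A, as structural recursion on the remaining distance
def nextDeloadLoop (week total : Int) : Option Int :=
  if _h : week ≤ total then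
    if week % 4 = 0 then some week
    else nextDeloadLoop (week + 1) total
  else none
termination_by (total + 1 - week).toNat
decreasing_by omega

def next_deload_week_py (current_week : Option Int) (total_weeks : Int) : Option Int :=
  match current_week with
  | none => none
  | some cw => if total_weeks ≤ 0 then none else nextDeloadLoop cw total_weeks

-- ===== PORT B =====
def next_deload_week_py_alt (current_week : Option Int) (total_weeks : Int) : Option Int :=
  match current_week with
  | none => none
  | some cw =>
    if total_weeks ≤ 0 then none
    else
      let candidate := (PySem.Int.floordiv (cw + 3) 4) * 4
      if candidate ≤ total_weeks then some candidate else none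

-- ===== PRECONDITION & SPEC =====
def Spec_next_deload_week_py (current_week : Option Int) (total_weeks : Int) (out : Option Int) : Prop := out = next_deload_week_py_alt current_week total_weeks
instance (current_week : Option Int) (total_weeks : Int) (out : Option Int) : Decidable (Spec_next_deload_week_py current_week total_weeks out) := by unfold Spec_next_deload_week_py; infer_instance

-- ===== CLAIM (what is proved, stated in full; the proofs are below) =====
def Claim_equal_next_deload_week_py : Prop := ∀ (current_week : Option Int) (total_weeks : Int), Dom_next_deload_week_py current_week total_weeks → Spec_next_deload_week_py current_week total_weeks (next_deload_week_py current_week total_weeks)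

-- ===== LEMMAS AND PROOFS =====
-- the loop returns the smallest multiple of 4 that is ≥ week, if it is ≤ total, else none
theorem nextDeloadLoop_eq (week total : Int) :
    nextDeloadLoop week total =
      (if ((week + 3) / 4) * 4 ≤ total then some (((week + 3) / 4) * 4) else none) := by
  unfold nextDeloadLoop
  by_cases h1 : week ≤ total
  · by_cases h2 : week % 4 = 0
    · have hc : (week + 3) / 4 * 4 = week := by omega
      rw [dif_pos h1, if_pos h2, hc, if_pos h1]
    · rw [dif_pos h1, if_neg h2, nextDeloadLoop_eq (week + 1) total]
      have : (week + 1 + 3) / 4 = (week + 3) / 4 := by omega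
      rw [this]
  · have hc : ¬ ((week + 3) / 4 * 4 ≤ total) := by omega
    rw [dif_neg h1, if_neg hc]
termination_by (total + 1 - week).toNat
decreasing_by omega

-- ===== VERDICT (by name: the statement is the Claim_ definition above) =====
theorem next_deload_week_py_spec : Claim_equal_next_deload_week_py := by
  intro current_week total_weeks _
  unfold Spec_next_deload_week_py next_deload_week_py next_deload_week_py_alt
  cases current_week with
  | none => rfl
  | some cw =>
    simp only
    by_cases h : total_weeks ≤ 0
    · rw [if_pos h, if_pos h]
    · rw [if_neg h, if_neg h, nextDeloadLoop_eq]
      simp only [PySem.Int.floordiv_eq_ediv_of_pos (by norm_num : (0:Int) < 4)]
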